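-- pv_equiv track=rewrite | github.com/pypi-data/pypi-mirror-99 | packages/agunua/agunua-1.2.tar.gz/agunua-1.2/Agunua/urltinkering.py | delete_first_segment
-- ===== SOURCE A (Python) =====
-- def delete_first_segment(path):
--     first_slash = path.find("/")
--     if first_slash == -1:
--         return (path, "")
--     elif first_slash == 0:
--         (first, rest) = delete_first_segment(path[1:])
--     else:
--         first = path[0:first_slash]
--         rest = path[first_slash:]
--     if not first.startswith("/"):
--         first = "/" + first
--     if first == "/.":
--         first = ""
--     elif first == "/":
--         first = ""
--     return (first, rest)
-- ===== SOURCE B (Python) =====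
-- def delete_first_segment(path):
--     if "/" not in path:
--         return (path, "")
--     i = 0
--     while i < len(path) and path[i] == "/":
--         i += 1
--     j = path.find("/", i)
--     if j == -1:
--         seg, rest = path[i:], ""
--     else:
--         seg, rest = path[i:j], path[j:]
--     first = "/" + seg
--     if first == "/" or first == "/.":
--         first = ""
--     return (first, rest)
-- ===== Notes on version B (the rewrite author's own statement) =====
-- stated objective: simpler
-- what changed: Replaces A's recursion over leading slashes (with per-level re-normalization) by a single linear scan: skip leading slashes with an index, find the next slash once, slice segment and rest, then normalize once.
import Mathlib
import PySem

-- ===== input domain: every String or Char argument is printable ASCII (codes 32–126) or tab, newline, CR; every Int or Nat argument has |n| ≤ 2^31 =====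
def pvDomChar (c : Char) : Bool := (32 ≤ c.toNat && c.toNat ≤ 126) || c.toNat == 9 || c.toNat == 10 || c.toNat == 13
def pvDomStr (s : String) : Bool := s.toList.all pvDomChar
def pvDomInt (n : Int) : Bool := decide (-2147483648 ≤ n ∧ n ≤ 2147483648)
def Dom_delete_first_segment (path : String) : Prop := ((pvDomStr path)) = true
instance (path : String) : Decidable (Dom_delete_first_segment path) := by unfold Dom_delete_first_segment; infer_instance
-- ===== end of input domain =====

-- B replaces A's recursion over leading slashes by a single linear scan with one final normalization; objective: simpler.

-- ===== PORT A =====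
-- A's tail normalization, applied after each non-base case (kept as a helper for clarity).
def dfsFixA (fr : List Char × List Char) : List Char × List Char :=
  let first := if PySem.Chars.startswith fr.1 ['/'] then fr.1 else '/' :: fr.1
  if first = ['/', '.'] then ([], fr.2)
  else if first = ['/'] then ([], fr.2)
  else (first, fr.2)

def dfsA (s : List Char) : List Char × List Char :=
  if PySem.Chars.find s ['/'] = -1 then (s, [])
  else if h0 : PySem.Chars.find s ['/'] = 0 then
    dfsFixA (dfsA (PySem.Chars.slice s (some 1) none))
  else
    dfsFixA (PySem.Chars.slice s (some 0) (some (PySem.Chars.find s ['/'])),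
             PySem.Chars.slice s (some (PySem.Chars.find s ['/'])) none)
termination_by s.length
decreasing_by
  have hne : s ≠ [] := by
    intro heq; subst heq
    exact absurd h0 (by decide)
  simp [PySem.Chars.slice_eq_listSlice, PySem.List.slice_from_one]
  cases s with
  | nil => exact absurd rfl hne
  | cons c t => simp

def delete_first_segment (path : String) : String × String :=
  let p := dfsA path.toList
  (String.ofList p.1, String.ofList p.2)

-- ===== PORT B =====
-- the while loop of B: number of leading '/'
def countSlashes : List Char → Nat
  | [] => 0
  | c :: t => if c = '/' then countSlashes t + 1 else 0

def dfsBcore (s : List Char) (i : Nat) (j : Int) : List Char × List Char :=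
  let sr := if j = -1 then (PySem.Chars.slice s (some (i : Int)) none, ([] : List Char))
            else (PySem.Chars.slice s (some (i : Int)) (some j), PySem.Chars.slice s (some j) none)
  let first := '/' :: sr.1
  if first = ['/'] ∨ first = ['/', '.'] then ([], sr.2) else (first, sr.2)

def dfsB (s : List Char) : List Char × List Char :=
  if PySem.Chars.isIn ['/'] s = false then (s, [])
  else dfsBcore s (countSlashes s) (PySem.Chars.findFrom s ['/'] ((countSlashes s : Int)) none)

def delete_first_segment_alt (path : String) : String × String :=
  let p := dfsB path.toList
  (String.ofList p.1, String.ofList p.2)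

-- ===== PRECONDITION & SPEC =====
def Spec_delete_first_segment (path : String) (out : String × String) : Prop := out = delete_first_segment_alt path
instance (path : String) (out : String × String) : Decidable (Spec_delete_first_segment path out) := by unfold Spec_delete_first_segment; infer_instance

-- ===== CLAIM (what is proved, stated in full; the proofs are below) =====
def Claim_equal_delete_first_segment : Prop := ∀ (path : String), Dom_delete_first_segment path → Spec_delete_first_segment path (delete_first_segment path)

-- ===== LEMMAS AND PROOFS =====

theorem infix_singleton_iff (c : Char) (s : List Char) : [c] <:+: s ↔ c ∈ s := by
  constructor
  · intro h; exact h.sublist.subset (by simp)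
  · intro h
    obtain ⟨l1, l2, rfl⟩ := List.append_of_mem h
    exact ⟨l1, l2, by simp⟩

theorem find_neg_iff (s : List Char) : PySem.Chars.find s ['/'] = -1 ↔ '/' ∉ s := by
  rw [PySem.Chars.find_eq_neg_one_iff, infix_singleton_iff]

theorem find_cons_slash (t : List Char) : PySem.Chars.find ('/' :: t) ['/'] = 0 := by
  have h0 : (0:Int) ≤ PySem.Chars.find ('/' :: t) ['/'] := by
    rw [PySem.Chars.find_nonneg_iff, infix_singleton_iff]; simp
  have hspec := PySem.Chars.find_spec (s := '/' :: t) (sub := ['/']) h0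
  by_contra hne
  have hpos : 0 < (PySem.Chars.find ('/' :: t) ['/']).toNat := by omega
  exact hspec.2 0 hpos ⟨t, rfl⟩

theorem countSlashes_le (s : List Char) : countSlashes s ≤ s.length := by
  induction s with
  | nil => simp [countSlashes]
  | cons c t ih => simp only [countSlashes, List.length_cons]; split <;> omega

theorem fix_guard (seg rest : List Char) :
    dfsFixA (if '/' :: seg = ['/'] ∨ '/' :: seg = ['/', '.'] then (([] : List Char), rest) else ('/' :: seg, rest))
      = (if '/' :: seg = ['/'] ∨ '/' :: seg = ['/', '.'] then (([] : List Char), rest) else ('/' :: seg, rest)) := by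
  split
  · unfold dfsFixA
    have h1 : PySem.Chars.startswith ([] : List Char) ['/'] = false := by decide
    simp [h1]
  · rename_i hg
    push_neg at hg
    unfold dfsFixA
    have hsw : PySem.Chars.startswith ('/' :: seg) ['/'] = true := by
      rw [PySem.Chars.startswith_iff]; exact ⟨seg, rfl⟩
    simp only [hsw, if_true]
    rw [if_neg hg.2, if_neg hg.1]

theorem fix_dfsBcore (s : List Char) (i : Nat) (j : Int) :
    dfsFixA (dfsBcore s i j) = dfsBcore s i j := by
  unfold dfsBcore
  exact fix_guard _ _

theorem fix_dfsB (s : List Char) (h : PySem.Chars.isIn ['/'] s = true) :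
    dfsFixA (dfsB s) = dfsB s := by
  unfold dfsB
  rw [h]
  simp only [Bool.true_eq_false, if_false]
  exact fix_dfsBcore _ _ _

theorem dfsBcore_eq_of (s s' : List Char) (i i' : Nat) (j j' : Int)
    (h : (if j = -1 then (PySem.Chars.slice s (some (i : Int)) none, ([] : List Char))
          else (PySem.Chars.slice s (some (i : Int)) (some j), PySem.Chars.slice s (some j) none))
       = (if j' = -1 then (PySem.Chars.slice s' (some (i' : Int)) none, ([] : List Char))
          else (PySem.Chars.slice s' (some (i' : Int)) (some j'), PySem.Chars.slice s' (some j') none))) :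
    dfsBcore s i j = dfsBcore s' i' j' := by
  unfold dfsBcore
  rw [h]

theorem dfsB_cons_slash (t : List Char) (h : PySem.Chars.isIn ['/'] t = true) :
    dfsB ('/' :: t) = dfsB t := by
  have hs : PySem.Chars.isIn ['/'] ('/' :: t) = true := by
    rw [PySem.Chars.isIn_iff_infix] at *
    exact h.trans (List.suffix_cons '/' t).isInfix
  have hcs : countSlashes ('/' :: t) = countSlashes t + 1 := by simp [countSlashes]
  have hle : countSlashes t ≤ t.length := countSlashes_le t
  set k := countSlashes t with hk
  have hfs := PySem.Chars.findFrom_natCast ('/' :: t) ['/'] (k + 1) (by simp; omega)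
  have hft := PySem.Chars.findFrom_natCast t ['/'] k hle
  have hdrop : ('/' :: t).drop (k + 1) = t.drop k := rfl
  rw [hdrop] at hfs
  unfold dfsB
  rw [h, hs]
  simp only [Bool.true_eq_false, if_false]
  rw [hcs, ← hk]
  push_cast
  by_cases hf : PySem.Chars.find (t.drop k) ['/'] = -1
  · simp [hf] at hfs hft
    rw [hfs, hft]
    apply dfsBcore_eq_of
    rw [if_pos rfl, if_pos rfl]
    rw [PySem.Chars.slice_eq_listSlice, PySem.Chars.slice_eq_listSlice,
        PySem.List.slice_from_natCast, PySem.List.slice_from_natCast, hdrop]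
  · have h0 : (0:Int) ≤ PySem.Chars.find (t.drop k) ['/'] := by
      have := PySem.Chars.neg_one_le_find (s := t.drop k) (sub := ['/'])
      omega
    set fn := (PySem.Chars.find (t.drop k) ['/']).toNat with hfn
    have hfe : PySem.Chars.find (t.drop k) ['/'] = (fn : Int) := by omega
    rw [hfe] at hfs hft
    rw [if_neg (show ¬ ((fn : Nat) : Int) = -1 by omega)] at hfs hft
    have hk1 : ((k + 1 : Nat) : Int) = (k : Int) + 1 := by push_cast; ring
    have e1 : ((k : Int) + 1) + (fn : Int) = ((k + 1 + fn : Nat) : Int) := by push_cast; ring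
    have e2 : (k : Int) + (fn : Int) = ((k + fn : Nat) : Int) := by push_cast; ring
    rw [hk1, e1] at hfs
    rw [e2] at hft
    rw [hfs, hft]
    apply dfsBcore_eq_of
    rw [if_neg (show ¬ ((k + 1 + fn : Nat) : Int) = -1 by omega),
        if_neg (show ¬ ((k + fn : Nat) : Int) = -1 by omega)]
    have hd2 : ('/' :: t).drop (k + 1 + fn) = t.drop (k + fn) := by
      have e : k + 1 + fn = (k + fn) + 1 := by omega
      rw [e, List.drop_succ_cons]
    simp only [PySem.Chars.slice_eq_listSlice, PySem.List.slice_natCast,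
        PySem.List.slice_from_natCast, hdrop, hd2]
    have e3 : k + 1 + fn - (k + 1) = fn := by omega
    have e4 : k + fn - k = fn := by omega
    rw [e3, e4]

theorem isIn_mem (s : List Char) : PySem.Chars.isIn ['/'] s = true ↔ '/' ∈ s := by
  rw [PySem.Chars.isIn_iff_infix, infix_singleton_iff]

theorem sw_false (seg : List Char) (h : seg.head? ≠ some '/') :
    PySem.Chars.startswith seg ['/'] = false := by
  rw [Bool.eq_false_iff]
  intro hh
  rw [PySem.Chars.startswith_iff] at hh
  obtain ⟨u, hu⟩ := hh
  exact h (by rw [← hu]; rfl)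

theorem fixA_eq_guard (seg rest : List Char) (hsw : PySem.Chars.startswith seg ['/'] = false) :
    dfsFixA (seg, rest) =
      (if '/' :: seg = ['/'] ∨ '/' :: seg = ['/', '.'] then (([] : List Char), rest) else ('/' :: seg, rest)) := by
  unfold dfsFixA
  simp only [hsw, Bool.false_eq_true, if_false]
  by_cases h1 : '/' :: seg = ['/', '.']
  · rw [if_pos h1, if_pos (Or.inr h1)]
  · rw [if_neg h1]
    by_cases h2 : '/' :: seg = ['/']
    · rw [if_pos h2, if_pos (Or.inl h2)]
    · rw [if_neg h2, if_neg (by tauto)]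

theorem countSlashes_head (t : List Char) (h : t.head? ≠ some '/') : countSlashes t = 0 := by
  cases t with
  | nil => rfl
  | cons c l =>
    have : ¬ c = '/' := fun hc => h (by rw [hc]; rfl)
    simp [countSlashes, this]

theorem head_ne_of_not_mem (c : Char) (u : List Char) (h : c ∉ u) : u.head? ≠ some c := by
  intro hx
  cases u with
  | nil => simp at hx
  | cons a l =>
    apply h
    have : a = c := by simpa using hx
    simp [this]

theorem main_eq : ∀ s : List Char, dfsA s = dfsB s := by
  intro s
  induction s with
  | nil =>
    rw [dfsA]
    rw [if_pos (by decide : PySem.Chars.find ([] : List Char) ['/'] = -1)]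
    unfold dfsB
    rw [if_pos (by decide : PySem.Chars.isIn ['/'] ([] : List Char) = false)]
  | cons c t ih =>
    by_cases hc : c = '/'
    · subst hc
      have hsl : PySem.Chars.slice ('/' :: t) (some 1) none = t := by
        rw [PySem.Chars.slice_eq_listSlice, PySem.List.slice_from_one]
        rfl
      have hA : dfsA ('/' :: t) = dfsFixA (dfsA t) := by
        rw [dfsA, find_cons_slash]
        rw [if_neg (by omega : ¬ (0:Int) = -1), dif_pos rfl, hsl]
      rw [hA, ih]
      by_cases hm : '/' ∈ t
      · have h := (isIn_mem t).mpr hm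
        rw [fix_dfsB t h, dfsB_cons_slash t h]
      · have hif : PySem.Chars.isIn ['/'] t = false := by
          rw [Bool.eq_false_iff]; intro hx; exact hm ((isIn_mem t).mp hx)
        have hBt : dfsB t = (t, []) := by
          unfold dfsB; rw [if_pos hif]
        rw [hBt]
        have hs : PySem.Chars.isIn ['/'] ('/' :: t) = true := (isIn_mem _).mpr (by simp)
        have hcs1 : countSlashes ('/' :: t) = 1 := by
          have h0 : countSlashes t = 0 := countSlashes_head t (head_ne_of_not_mem _ _ hm)
          simp [countSlashes, h0]
        have hff : PySem.Chars.findFrom ('/' :: t) ['/'] ((1 : Nat) : Int) none = -1 := by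
          rw [PySem.Chars.findFrom_natCast _ _ 1 (by simp)]
          have hdt : PySem.Chars.find (('/' :: t).drop 1) ['/'] = -1 := by
            rw [show ('/' :: t).drop 1 = t from rfl, find_neg_iff]; exact hm
          rw [hdt]
          simp
        unfold dfsB
        rw [hs]
        simp only [Bool.true_eq_false, if_false]
        rw [hcs1, hff]
        rw [fixA_eq_guard t [] (sw_false t (head_ne_of_not_mem _ _ hm))]
        unfold dfsBcore
        rw [if_pos rfl]
        have hsl1 : PySem.Chars.slice ('/' :: t) (some ((1 : Nat) : Int)) none = t := by
          rw [PySem.Chars.slice_eq_listSlice, PySem.List.slice_from_natCast]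
          rfl
        rw [hsl1]
    · have hhead : (c :: t).head? ≠ some '/' := by
        intro hx; exact hc (by simpa using hx)
      by_cases hm : '/' ∈ c :: t
      · have h0 : (0:Int) ≤ PySem.Chars.find (c :: t) ['/'] := by
          rw [PySem.Chars.find_nonneg_iff, infix_singleton_iff]; exact hm
        have hne0 : PySem.Chars.find (c :: t) ['/'] ≠ 0 := by
          intro h00
          have hspec := PySem.Chars.find_spec (s := c :: t) (sub := ['/']) h0
          have hp := hspec.1
          rw [h00] at hp
          simp only [Int.toNat_zero, List.drop_zero] at hp
          obtain ⟨u, hu⟩ := hp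
          exact hc (by injection hu with h1 _; exact h1.symm)
        set fn := (PySem.Chars.find (c :: t) ['/']).toNat with hfn
        have hfe : PySem.Chars.find (c :: t) ['/'] = (fn : Int) := by omega
        have hfn1 : 1 ≤ fn := by omega
        have htakeA : PySem.Chars.slice (c :: t) (some (0 : Int)) (some ((fn : Nat) : Int)) = (c :: t).take fn := by
          rw [PySem.Chars.slice_eq_listSlice, PySem.List.slice_zero_start, PySem.List.slice_to_natCast]
        have htakeB : PySem.Chars.slice (c :: t) (some ((0 : Nat) : Int)) (some ((fn : Nat) : Int)) = (c :: t).take fn := by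
          rw [Nat.cast_zero]; exact htakeA
        have hdropn : PySem.Chars.slice (c :: t) (some ((fn : Nat) : Int)) none = (c :: t).drop fn := by
          rw [PySem.Chars.slice_eq_listSlice, PySem.List.slice_from_natCast]
        have hA : dfsA (c :: t) = dfsFixA ((c :: t).take fn, (c :: t).drop fn) := by
          rw [dfsA, hfe]
          rw [if_neg (by omega), dif_neg (by omega)]
          rw [htakeA, hdropn]
        have hsw : PySem.Chars.startswith ((c :: t).take fn) ['/'] = false := by
          apply sw_false
          obtain ⟨n, hn⟩ : ∃ n, fn = n + 1 := ⟨fn - 1, by omega⟩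
          rw [hn, List.take_succ_cons]
          intro hx; exact hc (by simpa using hx)
        have hs : PySem.Chars.isIn ['/'] (c :: t) = true := (isIn_mem _).mpr hm
        have hcs0 : countSlashes (c :: t) = 0 := countSlashes_head _ hhead
        have hffz : PySem.Chars.findFrom (c :: t) ['/'] ((0 : Nat) : Int) none = (fn : Int) := by
          rw [Nat.cast_zero, PySem.Chars.findFrom_zero, hfe]
        unfold dfsB
        rw [hs]
        simp only [Bool.true_eq_false, if_false]
        rw [hcs0, hffz]
        rw [hA, fixA_eq_guard _ _ hsw]
        unfold dfsBcore
        rw [if_neg (by omega : ¬ (fn : Int) = -1)]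
        rw [htakeB, hdropn]
      · have hfneg : PySem.Chars.find (c :: t) ['/'] = -1 := (find_neg_iff _).mpr hm
        have hif : PySem.Chars.isIn ['/'] (c :: t) = false := by
          rw [Bool.eq_false_iff]; intro hx; exact hm ((isIn_mem _).mp hx)
        rw [dfsA, if_pos hfneg]
        unfold dfsB
        rw [if_pos hif]

-- ===== VERDICT (by name: the statement is the Claim_ definition above) =====
theorem delete_first_segment_spec : Claim_equal_delete_first_segment := by
  intro path _
  show _ = _
  unfold delete_first_segment delete_first_segment_alt
  rw [main_eq]
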